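-- pv_equiv track=rewrite | github.com/iamraj25/infytq_sample_questions | PA_2_1.py | seed_no
-- ===== SOURCE A (Python) =====
-- def seed_no(number, ref_no):
--     product = number
--     temp = number
--     while temp > 0:
--         product = product*(temp % 10)
--         temp //= 10
--     if product == ref_no:
--         return True
--     else:
--         return False
-- ===== SOURCE B (Python) =====
-- def seed_no(number, ref_no):
--     product = number
--     if number > 0:
--         for ch in str(number):
--             product *= int(ch)
--     return product == ref_no
-- ===== Notes on version B (the rewrite author's own statement) =====
-- stated objective: idiomatic
-- what changed: B extracts the digits from str(number) and folds them most-significant-first, instead of A's while-loop that peels digits arithmetically with % 10 and //= 10 least-significant-first.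
import Mathlib
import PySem

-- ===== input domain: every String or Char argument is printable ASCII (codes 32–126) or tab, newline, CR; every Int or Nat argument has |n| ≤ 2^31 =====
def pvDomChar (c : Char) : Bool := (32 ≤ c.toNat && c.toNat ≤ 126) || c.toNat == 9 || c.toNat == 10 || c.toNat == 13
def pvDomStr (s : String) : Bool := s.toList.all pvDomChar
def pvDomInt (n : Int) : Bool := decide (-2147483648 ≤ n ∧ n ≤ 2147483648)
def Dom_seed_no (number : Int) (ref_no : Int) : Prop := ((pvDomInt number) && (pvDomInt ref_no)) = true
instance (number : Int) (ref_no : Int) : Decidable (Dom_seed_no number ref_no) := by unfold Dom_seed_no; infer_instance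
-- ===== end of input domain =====

-- B reads the digits of number from str(number) most-significant-first instead of A's %10 // 10 while-loop (idiomatic, same cost).


-- ===== PORT A =====
-- the while-loop: product = product * (temp % 10); temp //= 10  while temp > 0
def seedLoop (product : Int) (temp : Int) : Int :=
  if _h : temp > 0 then
    seedLoop (product * PySem.Int.mod temp 10) (PySem.Int.floordiv temp 10)
  else
    product
termination_by temp.toNat
decreasing_by
  have h10 : PySem.Int.floordiv temp 10 = temp / 10 :=
    PySem.Int.floordiv_eq_ediv_of_pos (by norm_num)
  rw [h10]; omega

def seed_no (number : Int) (ref_no : Int) : Bool :=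
  if seedLoop number number = ref_no then true else false

-- ===== PORT B =====
-- int(ch) for a single character: exact for the decimal digit characters str(number) yields when number > 0
def pyDigitInt (c : Char) : Int := (c.toNat : Int) - 48

def seed_no_alt (number : Int) (ref_no : Int) : Bool :=
  let product :=
    if number > 0 then
      (PySem.Int.toChars number).foldl (fun p c => p * pyDigitInt c) number
    else number
  product == ref_no

-- ===== PRECONDITION & SPEC =====
def Spec_seed_no (number : Int) (ref_no : Int) (out : Bool) : Prop := out = seed_no_alt number ref_no
instance (number : Int) (ref_no : Int) (out : Bool) : Decidable (Spec_seed_no number ref_no out) := by unfold Spec_seed_no; infer_instance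

-- ===== CLAIM (what is proved, stated in full; the proofs are below) =====
def Claim_equal_seed_no : Prop := ∀ (number : Int) (ref_no : Int), Dom_seed_no number ref_no → Spec_seed_no number ref_no (seed_no number ref_no)

-- ===== LEMMAS AND PROOFS =====

theorem seedLoop_nonpos (p temp : Int) (h : ¬ temp > 0) : seedLoop p temp = p := by
  rw [seedLoop]; simp [h]

theorem seedLoop_pos (p temp : Int) (h : temp > 0) :
    seedLoop p temp = seedLoop (p * PySem.Int.mod temp 10) (PySem.Int.floordiv temp 10) := by
  rw [seedLoop]; simp [h]

theorem floordiv_ten_natCast (n : Nat) : PySem.Int.floordiv (n : Int) 10 = ((n / 10 : Nat) : Int) := by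
  exact_mod_cast PySem.Int.floordiv_natCast n 10

theorem mod_ten_natCast (n : Nat) : PySem.Int.mod (n : Int) 10 = ((n % 10 : Nat) : Int) := by
  exact_mod_cast PySem.Int.mod_natCast n 10

-- the loop's accumulator is a pure multiplicative factor
theorem seedLoop_mul (k : Nat) : ∀ (temp : Int), temp.toNat ≤ k → ∀ (a c : Int),
    seedLoop (a * c) temp = seedLoop a temp * c := by
  induction k with
  | zero =>
    intro temp hle a c
    have h : ¬ temp > 0 := by omega
    rw [seedLoop_nonpos _ _ h, seedLoop_nonpos _ _ h]
  | succ k ih =>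
    intro temp hle a c
    by_cases h : temp > 0
    · rw [seedLoop_pos _ _ h, seedLoop_pos a _ h]
      have h10 : PySem.Int.floordiv temp 10 = temp / 10 :=
        PySem.Int.floordiv_eq_ediv_of_pos (by norm_num)
      have hle' : (PySem.Int.floordiv temp 10).toNat ≤ k := by rw [h10]; omega
      have : a * c * PySem.Int.mod temp 10 = a * PySem.Int.mod temp 10 * c := by ring
      rw [this, ih _ hle']
    · rw [seedLoop_nonpos _ _ h, seedLoop_nonpos _ _ h]

theorem pyDigitInt_digitChar : ∀ m : Nat, m < 10 → pyDigitInt (Nat.digitChar m) = (m : Int) := by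
  decide

-- folding B's digit characters equals running A's loop
theorem fold_toDigitsCore (fuel : Nat) : ∀ (n : Nat), n < fuel → 0 < n → ∀ (acc : Int) (ds : List Char),
    List.foldl (fun p c => p * pyDigitInt c) acc (Nat.toDigitsCore 10 fuel n ds)
      = List.foldl (fun p c => p * pyDigitInt c) (seedLoop acc (n : Int)) ds := by
  induction fuel with
  | zero => intro n hn; omega
  | succ fuel ih =>
    intro n hn hpos acc ds
    have hstep : seedLoop acc (n : Int)
        = seedLoop (acc * ((n % 10 : Nat) : Int)) ((n / 10 : Nat) : Int) := by
      rw [seedLoop_pos _ _ (by exact_mod_cast hpos), mod_ten_natCast, floordiv_ten_natCast]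
    by_cases hz : n / 10 = 0
    · have hlt : n < 10 := by omega
      have hmod : n % 10 = n := Nat.mod_eq_of_lt hlt
      simp only [Nat.toDigitsCore, hz, if_pos]
      rw [hstep, hz, hmod]
      rw [seedLoop_nonpos _ _ (by norm_num)]
      simp [List.foldl_cons, pyDigitInt_digitChar n hlt]
    · simp only [Nat.toDigitsCore, hz, ite_false]
      rw [ih (n / 10) (by omega) (by omega) acc (Nat.digitChar (n % 10) :: ds)]
      simp only [List.foldl_cons]
      rw [hstep]
      have := seedLoop_mul (n / 10) ((n / 10 : Nat) : Int) (by simp) acc ((n % 10 : Nat) : Int)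
      rw [this, pyDigitInt_digitChar (n % 10) (Nat.mod_lt _ (by norm_num))]

theorem fold_toChars (number : Int) (h : number > 0) :
    (PySem.Int.toChars number).foldl (fun p c => p * pyDigitInt c) number
      = seedLoop number number := by
  have hneg : ¬ number < 0 := by omega
  have htoN : ((number.toNat : Nat) : Int) = number := Int.toNat_of_nonneg (by omega)
  simp only [PySem.Int.toChars, hneg, ite_false]
  unfold Nat.toDigits
  rw [fold_toDigitsCore (number.toNat + 1) number.toNat (by omega) (by omega) number []]
  rw [htoN]
  simp

-- ===== VERDICT (by name: the statement is the Claim_ definition above) =====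
theorem seed_no_spec : Claim_equal_seed_no := by
  intro number ref_no _
  unfold Spec_seed_no seed_no seed_no_alt
  by_cases h : number > 0
  · simp only [h, if_pos, fold_toChars number h]
    by_cases he : seedLoop number number = ref_no <;> simp [he]
  · simp only [h, ite_false]
    rw [seedLoop_nonpos _ _ h]
    by_cases he : number = ref_no <;> simp [he]
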